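-- pv_equiv track=rewrite | github.com/jang1563/bioreview-bench | bioreview_bench/baseline/reviewer.py | _prioritize_sections
-- ===== SOURCE A (Python) =====
-- _SECTION_PRIORITY = [
--     "methods", "materials and methods", "materials & methods", "method", "methodology",
--     "results", "result",
--     "introduction", "intro", "background",
--     "discussion",
--     "conclusion", "conclusions",
--     "supplementary", "supplemental", "supporting",
-- ]
--
-- def _prioritize_sections(sections: dict[str, str]) -> list[tuple[str, str]]:
--     """Sort sections by review priority."""
--     ordered: list[tuple[str, str]] = []
--     seen: set[str] = set()
--
--     for priority_name in _SECTION_PRIORITY: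
--         for name, text in sections.items():
--             if name.lower() in seen:
--                 continue
--             if priority_name in name.lower():
--                 ordered.append((name, text))
--                 seen.add(name.lower())
--
--     # Remaining sections not matching any priority
--     for name, text in sections.items():
--         if name.lower() not in seen:
--             ordered.append((name, text))
--             seen.add(name.lower())
--
--     return ordered
-- ===== SOURCE B (Python) =====
-- _SECTION_PRIORITY = [
--     "methods", "materials and methods", "materials & methods", "method", "methodology",
--     "results", "result",
--     "introduction", "intro", "background",
--     "discussion",
--     "conclusion", "conclusions",
--     "supplementary", "supplemental", "supporting",
-- ]
--
--
-- def _priority_key(name: str) -> int: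
--     low = name.lower()
--     for i, p in enumerate(_SECTION_PRIORITY):
--         if p in low:
--             return i
--     return len(_SECTION_PRIORITY)
--
--
-- def _prioritize_sections(sections: dict[str, str]) -> list[tuple[str, str]]:
--     """Sort sections by review priority (bucket sort on the first-match priority index)."""
--     # one pass: dedupe by lowercased name, keeping the first occurrence
--     seen: set[str] = set()
--     deduped: list[tuple[str, str]] = []
--     for name, text in sections.items():
--         low = name.lower()
--         if low not in seen:
--             seen.add(low)
--             deduped.append((name, text))
--     # one pass: drop each section into its priority bucket
--     buckets: list[list[tuple[str, str]]] = [[] for _ in range(len(_SECTION_PRIORITY) + 1)]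
--     for item in deduped:
--         buckets[_priority_key(item[0])].append(item)
--     return [item for bucket in buckets for item in bucket]
-- ===== Notes on version B (the rewrite author's own statement) =====
-- stated objective: faster
-- what changed: Replaces A's 16 priority passes over the dict (each recomputing name.lower() and a seen-set check per item) with one dedup-by-lowercase pass followed by a single-pass bucket sort on the first-match priority index.
import Mathlib
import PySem

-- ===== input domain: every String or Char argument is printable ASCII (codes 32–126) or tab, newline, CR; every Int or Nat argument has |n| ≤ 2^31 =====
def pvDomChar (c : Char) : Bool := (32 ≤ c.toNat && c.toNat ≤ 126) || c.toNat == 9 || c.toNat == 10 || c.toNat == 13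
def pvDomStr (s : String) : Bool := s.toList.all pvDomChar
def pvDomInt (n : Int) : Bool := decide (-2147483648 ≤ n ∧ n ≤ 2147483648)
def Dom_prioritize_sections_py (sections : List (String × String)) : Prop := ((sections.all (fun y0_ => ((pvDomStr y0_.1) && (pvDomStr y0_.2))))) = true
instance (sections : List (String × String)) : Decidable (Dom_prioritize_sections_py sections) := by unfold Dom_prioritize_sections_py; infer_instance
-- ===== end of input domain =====

-- ===== PORT A =====
-- B replaces A's 16 priority passes over the dict by one dedup pass plus a single-pass
-- bucket sort on the first-match priority index (objective: faster by a constant factor).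
def pvPriority : List String :=
  ["methods", "materials and methods", "materials & methods", "method", "methodology",
   "results", "result",
   "introduction", "intro", "background",
   "discussion",
   "conclusion", "conclusions",
   "supplementary", "supplemental", "supporting"]

def prioritize_sections_py (sections : List (String × String)) : List (String × String) :=
  let st := pvPriority.foldl (fun (st : List (String × String) × PySem.Set String) priority_name =>
      sections.foldl (fun st p =>
        if PySem.Set.contains st.2 (PySem.Str.lower p.1) then st
        else if PySem.Str.isIn priority_name (PySem.Str.lower p.1) then
          (st.1 ++ [p], PySem.Set.add st.2 (PySem.Str.lower p.1))
        else st) st)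
    ([], PySem.Set.empty)
  let st := sections.foldl (fun st p =>
      if PySem.Set.contains st.2 (PySem.Str.lower p.1) then st
      else (st.1 ++ [p], PySem.Set.add st.2 (PySem.Str.lower p.1))) st
  st.1

-- ===== PORT B =====
-- _priority_key's loop with early return: first index whose keyword occurs in low, else the length
def pvKeyAux (ps : List String) (low : String) : Nat :=
  match ps with
  | [] => 0
  | p :: t => if PySem.Str.isIn p low then 0 else pvKeyAux t low + 1

def priority_key (name : String) : Nat := pvKeyAux pvPriority (PySem.Str.lower name)

def prioritize_sections_py_alt (sections : List (String × String)) : List (String × String) :=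
  let dd := (sections.foldl (fun (st : List (String × String) × PySem.Set String) p =>
      if PySem.Set.contains st.2 (PySem.Str.lower p.1) then st
      else (st.1 ++ [p], PySem.Set.add st.2 (PySem.Str.lower p.1))) ([], PySem.Set.empty)).1
  let buckets := dd.foldl (fun (bs : List (List (String × String))) item =>
      bs.set (priority_key item.1) (bs.getD (priority_key item.1) [] ++ [item]))
      (List.replicate (pvPriority.length + 1) [])
  buckets.flatten

-- ===== PRECONDITION & SPEC =====
def Spec_prioritize_sections_py (sections : List (String × String)) (out : List (String × String)) : Prop := out = prioritize_sections_py_alt sections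
instance (sections : List (String × String)) (out : List (String × String)) : Decidable (Spec_prioritize_sections_py sections out) := by unfold Spec_prioritize_sections_py; infer_instance

-- ===== CLAIM (what is proved, stated in full; the proofs are below) =====
def Claim_equal_prioritize_sections_py : Prop := ∀ (sections : List (String × String)), Dom_prioritize_sections_py sections → Spec_prioritize_sections_py sections (prioritize_sections_py sections)

-- ===== LEMMAS AND PROOFS =====

def pvLow (p : String × String) : String := PySem.Str.lower p.1
def pvM (q : String) (p : String × String) : Bool := PySem.Str.isIn q (pvLow p)
def pvNoneMatch (qs : List String) (p : String × String) : Bool := qs.all (fun q => !(pvM q p))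

def pvG (q : String) (st : List (String × String) × PySem.Set String) (p : String × String) :
    List (String × String) × PySem.Set String :=
  if PySem.Set.contains st.2 (PySem.Str.lower p.1) then st
  else if PySem.Str.isIn q (PySem.Str.lower p.1) then
    (st.1 ++ [p], PySem.Set.add st.2 (PySem.Str.lower p.1))
  else st

def pvH (st : List (String × String) × PySem.Set String) (p : String × String) :
    List (String × String) × PySem.Set String :=
  if PySem.Set.contains st.2 (PySem.Str.lower p.1) then st
  else (st.1 ++ [p], PySem.Set.add st.2 (PySem.Str.lower p.1))

def pvDdS (seen : PySem.Set String) : List (String × String) → List (String × String)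
  | [] => []
  | x :: t => if PySem.Set.contains seen (pvLow x) then pvDdS seen t
              else x :: pvDdS (PySem.Set.add seen (pvLow x)) t

def pvProc (sections : List (String × String)) : List String → PySem.Set String →
    List (String × String) × PySem.Set String
  | [], seen => ([], seen)
  | q :: t, seen =>
      let M := (pvDdS seen sections).filter (pvM q)
      let r := pvProc sections t (PySem.Set.update seen (M.map pvLow))
      (M ++ r.1, r.2)

def pvBk : List String → List (String × String) → List (String × String)
  | [], _ => []
  | q :: t, ys => ys.filter (pvM q) ++ pvBk t (ys.filter (fun x => !(pvM q x)))

lemma portA_eq (sections : List (String × String)) :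
    prioritize_sections_py sections =
      (sections.foldl pvH
        (pvPriority.foldl (fun st q => sections.foldl (pvG q) st) ([], PySem.Set.empty))).1 := rfl

lemma portB_eq (sections : List (String × String)) :
    prioritize_sections_py_alt sections =
      ((sections.foldl pvH ([], PySem.Set.empty)).1.foldl
        (fun (bs : List (List (String × String))) item =>
          bs.set (priority_key item.1) (bs.getD (priority_key item.1) [] ++ [item]))
        (List.replicate (pvPriority.length + 1) [])).flatten := rfl

lemma pv_contains_iff {s : PySem.Set String} {a : String} :
    PySem.Set.contains s a = true ↔ a ∈ s := List.contains_iff_mem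

lemma pv_mem_add {s : PySem.Set String} {a b : String} :
    a ∈ PySem.Set.add s b ↔ a ∈ s ∨ a = b := PySem.Set.mem_add s b a

lemma pv_mem_update {s : PySem.Set String} {l : List String} {a : String} :
    a ∈ PySem.Set.update s l ↔ a ∈ s ∨ a ∈ l := by
  induction l generalizing s with
  | nil => simp [PySem.Set.update]
  | cons x t ih =>
      show a ∈ PySem.Set.update (PySem.Set.add s x) t ↔ _
      rw [ih, pv_mem_add]
      simp [List.mem_cons]
      tauto

lemma pvDdS_congr {s₁ s₂ : PySem.Set String} (h : ∀ a, a ∈ s₁ ↔ a ∈ s₂)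
    (xs : List (String × String)) : pvDdS s₁ xs = pvDdS s₂ xs := by
  induction xs generalizing s₁ s₂ with
  | nil => rfl
  | cons x t ih =>
      simp only [pvDdS]
      by_cases hx : pvLow x ∈ s₁
      · rw [if_pos (pv_contains_iff.2 hx), if_pos (pv_contains_iff.2 ((h _).1 hx))]
        exact ih h
      · have hx2 : pvLow x ∉ s₂ := fun c => hx ((h _).2 c)
        rw [if_neg (fun c => hx (pv_contains_iff.1 c)),
            if_neg (fun c => hx2 (pv_contains_iff.1 c))]
        refine congrArg _ (ih fun a => ?_)
        rw [pv_mem_add, pv_mem_add, h a]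

lemma pvDdS_unseen {s : PySem.Set String} {xs : List (String × String)} :
    ∀ x ∈ pvDdS s xs, pvLow x ∉ s := by
  induction xs generalizing s with
  | nil => simp [pvDdS]
  | cons y t ih =>
      intro x hx
      simp only [pvDdS] at hx
      by_cases hy : pvLow y ∈ s
      · rw [if_pos (pv_contains_iff.2 hy)] at hx
        exact ih x hx
      · rw [if_neg (fun c => hy (pv_contains_iff.1 c))] at hx
        rcases List.mem_cons.1 hx with h1 | h1
        · subst h1; exact hy
        · intro hc
          exact ih x h1 (pv_mem_add.2 (Or.inl hc))

lemma pvDdS_low_nodup {s : PySem.Set String} {xs : List (String × String)} :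
    (pvDdS s xs).Pairwise (fun a b => pvLow a ≠ pvLow b) := by
  induction xs generalizing s with
  | nil => exact List.Pairwise.nil
  | cons y t ih =>
      simp only [pvDdS]
      by_cases hy : pvLow y ∈ s
      · rw [if_pos (pv_contains_iff.2 hy)]; exact ih
      · rw [if_neg (fun c => hy (pv_contains_iff.1 c))]
        refine List.Pairwise.cons (fun x hx => ?_) ih
        intro hc
        exact pvDdS_unseen x hx (pv_mem_add.2 (Or.inr hc.symm))

lemma pvDdS_update (T : List String) (s : PySem.Set String) (xs : List (String × String)) :
    pvDdS (PySem.Set.update s T) xs = (pvDdS s xs).filter (fun x => !(T.contains (pvLow x))) := by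
  induction xs generalizing s with
  | nil => rfl
  | cons x t ih =>
      simp only [pvDdS]
      by_cases hx : pvLow x ∈ s
      · rw [if_pos (pv_contains_iff.2 hx),
            if_pos (pv_contains_iff.2 (pv_mem_update.2 (Or.inl hx)))]
        exact ih s
      · rw [if_neg (fun c => hx (pv_contains_iff.1 c))]
        by_cases hT : pvLow x ∈ T
        · rw [if_pos (pv_contains_iff.2 (pv_mem_update.2 (Or.inr hT)))]
          have h1 : pvDdS (PySem.Set.update s T) t
              = pvDdS (PySem.Set.update (PySem.Set.add s (pvLow x)) T) t := by
            refine pvDdS_congr (fun a => ?_) t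
            rw [pv_mem_update, pv_mem_update, pv_mem_add]
            constructor
            · rintro (h | h)
              · exact Or.inl (Or.inl h)
              · exact Or.inr h
            · rintro ((h | h) | h)
              · exact Or.inl h
              · subst h; exact Or.inr hT
              · exact Or.inr h
          have hc : T.contains (pvLow x) = true := List.contains_iff_mem.2 hT
          rw [h1, ih, List.filter_cons, hc]
          simp
        · have hnm : pvLow x ∉ PySem.Set.update s T := fun c => by
            rcases pv_mem_update.1 c with h | h
            · exact hx h
            · exact hT h
          rw [if_neg (fun c => hnm (pv_contains_iff.1 c))]
          have h1 : pvDdS (PySem.Set.add (PySem.Set.update s T) (pvLow x)) t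
              = pvDdS (PySem.Set.update (PySem.Set.add s (pvLow x)) T) t := by
            refine pvDdS_congr (fun a => ?_) t
            rw [pv_mem_add, pv_mem_update, pv_mem_update, pv_mem_add]
            tauto
          have hc : T.contains (pvLow x) = false := by
            rw [← Bool.not_eq_true]
            exact fun c => hT (List.contains_iff_mem.1 c)
          rw [h1, ih, List.filter_cons, hc]
          simp

lemma pvDdS_add_nomatch (q : String) {a : String} (ha : PySem.Str.isIn q a = false)
    (t : List (String × String)) :
    ∀ (s : PySem.Set String),
    (pvDdS (PySem.Set.add s a) t).filter (pvM q) = (pvDdS s t).filter (pvM q) := by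
  induction t with
  | nil => intro s; rfl
  | cons y t ih =>
      intro s
      simp only [pvDdS]
      by_cases hy : pvLow y ∈ s
      · rw [if_pos (pv_contains_iff.2 hy),
            if_pos (pv_contains_iff.2 (pv_mem_add.2 (Or.inl hy)))]
        exact ih s
      · by_cases hya : pvLow y = a
        · rw [if_pos (pv_contains_iff.2 (pv_mem_add.2 (Or.inr hya))),
              if_neg (fun c => hy (pv_contains_iff.1 c))]
          have hm : pvM q y = false := by rw [pvM, hya]; exact ha
          rw [List.filter_cons, hm, hya]
          simp
        · have h1 : pvLow y ∉ PySem.Set.add s a := fun c => by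
            rcases pv_mem_add.1 c with h | h
            · exact hy h
            · exact hya h
          rw [if_neg (fun c => h1 (pv_contains_iff.1 c)),
              if_neg (fun c => hy (pv_contains_iff.1 c))]
          rw [List.filter_cons, List.filter_cons]
          have h2 : pvDdS (PySem.Set.add (PySem.Set.add s a) (pvLow y)) t
              = pvDdS (PySem.Set.add (PySem.Set.add s (pvLow y)) a) t := by
            refine pvDdS_congr (fun b => ?_) t
            rw [pv_mem_add, pv_mem_add, pv_mem_add, pv_mem_add]
            tauto
          rw [h2, ih (PySem.Set.add s (pvLow y))]

lemma pv_update_cons (s : PySem.Set String) (a : String) (l : List String) :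
    PySem.Set.update s (a :: l) = PySem.Set.update (PySem.Set.add s a) l := rfl

lemma pv_inner (q : String) (xs : List (String × String)) :
    ∀ (acc : List (String × String)) (seen : PySem.Set String),
    xs.foldl (pvG q) (acc, seen) =
      (acc ++ (pvDdS seen xs).filter (pvM q),
       PySem.Set.update seen (((pvDdS seen xs).filter (pvM q)).map pvLow)) := by
  induction xs with
  | nil => intro acc seen; simp [pvDdS, PySem.Set.update]
  | cons x t ih =>
      intro acc seen
      rw [List.foldl_cons]
      by_cases hx : pvLow x ∈ seen
      · have hg : pvG q (acc, seen) x = (acc, seen) := by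
          simp only [pvG]
          rw [show PySem.Str.lower x.1 = pvLow x from rfl]
          rw [if_pos (pv_contains_iff.2 hx)]
        rw [hg, ih]
        simp only [pvDdS]
        rw [if_pos (pv_contains_iff.2 hx)]
      · by_cases hm : PySem.Str.isIn q (PySem.Str.lower x.1) = true
        · have hg : pvG q (acc, seen) x = (acc ++ [x], PySem.Set.add seen (pvLow x)) := by
            simp only [pvG]
            rw [show PySem.Str.lower x.1 = pvLow x from rfl]
            rw [if_neg (fun c => hx (pv_contains_iff.1 c)),
              if_pos (show PySem.Str.isIn q (pvLow x) = true from hm)]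
          rw [hg, ih]
          simp only [pvDdS]
          rw [if_neg (fun c => hx (pv_contains_iff.1 c))]
          rw [List.filter_cons]
          have : pvM q x = true := hm
          rw [this]
          simp only [List.map_cons, pv_update_cons, List.append_assoc, List.singleton_append,
            if_true]
        · have hg : pvG q (acc, seen) x = (acc, seen) := by
            simp only [pvG]
            rw [show PySem.Str.lower x.1 = pvLow x from rfl]
            rw [if_neg (fun c => hx (pv_contains_iff.1 c)),
              if_neg (show ¬ PySem.Str.isIn q (pvLow x) = true from fun c => hm c)]
          rw [hg, ih]
          simp only [pvDdS]
          rw [if_neg (fun c => hx (pv_contains_iff.1 c))]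
          rw [List.filter_cons]
          have hmf : pvM q x = false := by
            rw [pvM, ← Bool.not_eq_true]
            exact fun c => hm c
          rw [hmf]
          rw [pvDdS_add_nomatch q (by rw [← Bool.not_eq_true]; exact fun c => hm c) t seen]
          simp

lemma pv_final (xs : List (String × String)) :
    ∀ (acc : List (String × String)) (seen : PySem.Set String),
    xs.foldl pvH (acc, seen) =
      (acc ++ pvDdS seen xs, PySem.Set.update seen ((pvDdS seen xs).map pvLow)) := by
  induction xs with
  | nil => intro acc seen; simp [pvDdS, PySem.Set.update]
  | cons x t ih =>
      intro acc seen
      rw [List.foldl_cons]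
      by_cases hx : pvLow x ∈ seen
      · have hg : pvH (acc, seen) x = (acc, seen) := by
          simp only [pvH]
          rw [show PySem.Str.lower x.1 = pvLow x from rfl]
          rw [if_pos (pv_contains_iff.2 hx)]
        rw [hg, ih]
        simp only [pvDdS]
        rw [if_pos (pv_contains_iff.2 hx)]
      · have hg : pvH (acc, seen) x = (acc ++ [x], PySem.Set.add seen (pvLow x)) := by
          simp only [pvH]
          rw [show PySem.Str.lower x.1 = pvLow x from rfl]
          rw [if_neg (fun c => hx (pv_contains_iff.1 c))]
        rw [hg, ih]
        simp only [pvDdS]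
        rw [if_neg (fun c => hx (pv_contains_iff.1 c))]
        simp only [List.map_cons, pv_update_cons, List.append_assoc, List.singleton_append]

lemma pv_outer (sections : List (String × String)) (qs : List String) :
    ∀ (acc : List (String × String)) (seen : PySem.Set String),
    qs.foldl (fun st q => sections.foldl (pvG q) st) (acc, seen) =
      (acc ++ (pvProc sections qs seen).1, (pvProc sections qs seen).2) := by
  induction qs with
  | nil => intro acc seen; simp [pvProc]
  | cons q t ih =>
      intro acc seen
      rw [List.foldl_cons]
      rw [pv_inner q sections acc seen, ih]
      simp only [pvProc, List.append_assoc]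

lemma pvProc_spec (sections : List (String × String)) (qs : List String) :
    ∀ (seen : PySem.Set String),
    (pvProc sections qs seen).1 = pvBk qs (pvDdS seen sections) ∧
    pvDdS (pvProc sections qs seen).2 sections
      = (pvDdS seen sections).filter (pvNoneMatch qs) := by
  induction qs with
  | nil =>
      intro seen
      constructor
      · rfl
      · show pvDdS seen sections = _
        rw [show pvNoneMatch [] = (fun _ => true) from rfl, List.filter_true]
  | cons q t ih =>
      intro seen
      have hkey : pvDdS (PySem.Set.update seen
          (((pvDdS seen sections).filter (pvM q)).map pvLow)) sections
          = (pvDdS seen sections).filter (fun x => !(pvM q x)) := by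
        rw [pvDdS_update]
        refine List.filter_congr (fun x hx => ?_)
        by_cases hm : pvM q x = true
        · have : x ∈ (pvDdS seen sections).filter (pvM q) := List.mem_filter.2 ⟨hx, hm⟩
          have : pvLow x ∈ ((pvDdS seen sections).filter (pvM q)).map pvLow :=
            List.mem_map.2 ⟨x, this, rfl⟩
          rw [List.contains_iff_mem.2 this, hm]
        · have hm' : pvM q x = false := by rw [← Bool.not_eq_true]; exact hm
          have hnc : (((pvDdS seen sections).filter (pvM q)).map pvLow).contains (pvLow x)
              = false := by
            rw [← Bool.not_eq_true]
            intro c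
            rcases List.mem_map.1 (List.contains_iff_mem.1 c) with ⟨y, hy, hyx⟩
            rcases List.mem_filter.1 hy with ⟨hy1, hy2⟩
            by_cases hxy : y = x
            · subst hxy; rw [hy2] at hm'; exact absurd hm' (by simp)
            · exact (List.Pairwise.forall (fun a b h c => (h c.symm).elim)
                pvDdS_low_nodup hy1 hx hxy) hyx
          rw [hnc, hm']
      constructor
      · show (pvDdS seen sections).filter (pvM q) ++ _ = _
        rw [(ih _).1, hkey]
        rfl
      · show pvDdS (pvProc sections t _).2 sections = _
        rw [(ih _).2, hkey, List.filter_filter]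
        refine List.filter_congr (fun x hx => ?_)
        simp [pvNoneMatch, Bool.and_comm]

lemma pvKeyAux_le (ps : List String) (l : String) : pvKeyAux ps l ≤ ps.length := by
  induction ps with
  | nil => simp [pvKeyAux]
  | cons p t ih =>
      simp only [pvKeyAux, List.length_cons]
      split
      · omega
      · omega

lemma pv_getD_range (bs : List (List (String × String))) :
    (List.range bs.length).map (fun j => bs.getD j []) = bs := by
  apply List.ext_getElem
  · simp
  · intro i h1 h2
    simp only [List.getElem_map, List.getElem_range]
    exact List.getD_eq_getElem bs [] (by simpa using h2)

lemma pv_buckets (xs : List (String × String)) :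
    ∀ (bs : List (List (String × String))),
    (∀ x ∈ xs, priority_key x.1 < bs.length) →
    xs.foldl (fun bs item =>
        bs.set (priority_key item.1) (bs.getD (priority_key item.1) [] ++ [item])) bs =
      (List.range bs.length).map
        (fun j => bs.getD j [] ++ xs.filter (fun x => priority_key x.1 == j)) := by
  induction xs with
  | nil =>
      intro bs _
      simp only [List.filter_nil, List.append_nil]
      exact (pv_getD_range bs).symm
  | cons x t ih =>
      intro bs hb
      rw [List.foldl_cons]
      set k := priority_key x.1 with hk
      set bs' := bs.set k (bs.getD k [] ++ [x]) with hbs'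
      have hlen : bs'.length = bs.length := List.length_set
      rw [ih bs' (fun y hy => by rw [hlen]; exact hb y (List.mem_cons_of_mem x hy)), hlen]
      refine List.map_congr_left (fun j hj => ?_)
      have hjlt : j < bs.length := List.mem_range.1 hj
      have hj' : j < bs'.length := by rw [hlen]; exact hjlt
      have hgd : bs'.getD j [] = if k = j then bs.getD j [] ++ [x] else bs.getD j [] := by
        rw [List.getD_eq_getElem bs' [] hj']
        simp only [hbs', List.getElem_set]
        split
        · rename_i h; rw [← h]
        · rw [List.getD_eq_getElem bs [] hjlt]
      rw [hgd, List.filter_cons]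
      by_cases hkj : k = j
      · rw [if_pos hkj]
        have : (priority_key x.1 == j) = true := by rw [← hk, hkj]; exact beq_self_eq_true j
        rw [this]
        simp
      · rw [if_neg hkj]
        have : (priority_key x.1 == j) = false := by
          rw [← hk]; exact beq_eq_false_iff_ne.2 hkj
        rw [this]
        simp

lemma pv_flatten_bk (ps : List String) :
    ∀ (ys : List (String × String)),
    ((List.range (ps.length + 1)).map
        (fun j => ys.filter (fun x => pvKeyAux ps (pvLow x) == j))).flatten =
      pvBk ps ys ++ ys.filter (pvNoneMatch ps) := by
  induction ps with
  | nil =>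
      intro ys
      rw [show pvNoneMatch [] = (fun _ => true) from rfl, List.filter_true]
      show ([(0:Nat)].map (fun j => ys.filter (fun x => pvKeyAux [] (pvLow x) == j))).flatten = _
      simp [pvKeyAux, pvBk]
  | cons q t ih =>
      intro ys
      rw [List.length_cons, List.range_succ_eq_map, List.map_cons, List.flatten_cons, List.map_map]
      have h0 : ys.filter (fun x => pvKeyAux (q :: t) (pvLow x) == 0) = ys.filter (pvM q) := by
        refine List.filter_congr (fun x _ => ?_)
        simp only [pvKeyAux]
        by_cases hm : pvM q x = true
        · rw [pvM] at hm; rw [if_pos hm]; rw [pvM, hm]; rfl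
        · have hm' : PySem.Str.isIn q (pvLow x) = false := by
            rw [← Bool.not_eq_true]; exact fun c => hm c
          rw [if_neg (by rw [hm']; exact fun c => nomatch c)]
          rw [pvM, hm']
          simp
      have h1 : ∀ j : ℕ, ys.filter (fun x => pvKeyAux (q :: t) (pvLow x) == j + 1)
          = (ys.filter (fun x => !(pvM q x))).filter (fun x => pvKeyAux t (pvLow x) == j) := by
        intro j
        rw [List.filter_filter]
        refine List.filter_congr (fun x _ => ?_)
        simp only [pvKeyAux]
        by_cases hm : PySem.Str.isIn q (pvLow x) = true
        · rw [if_pos hm, pvM, hm]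
          simp
        · have hm' : PySem.Str.isIn q (pvLow x) = false := by
            rw [← Bool.not_eq_true]; exact hm
          rw [if_neg (by rw [hm']; exact fun c => nomatch c), pvM, hm']
          simp
      have h2 : ((List.range (t.length + 1)).map
            ((fun j => ys.filter (fun x => pvKeyAux (q :: t) (pvLow x) == j)) ∘ Nat.succ)).flatten
          = pvBk t (ys.filter (fun x => !(pvM q x)))
            ++ (ys.filter (fun x => !(pvM q x))).filter (pvNoneMatch t) := by
        rw [show ((fun j => ys.filter (fun x => pvKeyAux (q :: t) (pvLow x) == j)) ∘ Nat.succ)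
            = (fun j => (ys.filter (fun x => !(pvM q x))).filter
                (fun x => pvKeyAux t (pvLow x) == j)) from funext (fun j => h1 j)]
        exact ih _
      rw [h0, h2]
      have h3 : (ys.filter (fun x => !(pvM q x))).filter (pvNoneMatch t)
          = ys.filter (pvNoneMatch (q :: t)) := by
        rw [List.filter_filter]
        refine List.filter_congr (fun x _ => ?_)
        simp [pvNoneMatch, Bool.and_comm]
      rw [h3]
      show _ = ys.filter (pvM q) ++ pvBk t (ys.filter (fun x => !(pvM q x))) ++ _
      rw [List.append_assoc]

-- ===== VERDICT (by name: the statement is the Claim_ definition above) =====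
theorem prioritize_sections_py_spec : Claim_equal_prioritize_sections_py := by
  unfold Claim_equal_prioritize_sections_py
  intro sections _
  unfold Spec_prioritize_sections_py
  rw [portA_eq, portB_eq]
  rw [pv_outer sections pvPriority [] PySem.Set.empty]
  rw [pv_final sections _ _]
  rcases pvProc_spec sections pvPriority PySem.Set.empty with ⟨hp1, hp2⟩
  rw [pv_final sections [] PySem.Set.empty]
  simp only [List.nil_append]
  set dd := pvDdS PySem.Set.empty sections with hdd
  rw [hp1, hp2]
  have hb := pv_buckets dd (List.replicate (pvPriority.length + 1) [])
      (fun x _ => by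
        rw [List.length_replicate]
        exact Nat.lt_succ_of_le (pvKeyAux_le pvPriority (PySem.Str.lower x.1)))
  rw [hb, List.length_replicate]
  have hmap : (List.range (pvPriority.length + 1)).map
        (fun j => (List.replicate (pvPriority.length + 1)
            ([] : List (String × String))).getD j [] ++ dd.filter (fun x => priority_key x.1 == j))
      = (List.range (pvPriority.length + 1)).map
        (fun j => dd.filter (fun x => pvKeyAux pvPriority (pvLow x) == j)) := by
    refine List.map_congr_left (fun j hj => ?_)
    rw [List.getD_replicate _ (List.mem_range.1 hj), List.nil_append]
    rfl
  rw [hmap, pv_flatten_bk pvPriority dd]
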